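-- pv_equiv track=rewrite | github.com/Gaius-Augustus/Augustus | tests/examples_test/aug_comparator.py | create_html_filename
-- ===== SOURCE A (Python) =====
-- def create_html_filename(name):
--     html_name = ''
--     elements = []
--     parts = name.split('/')
--
--     for p in reversed(parts):
--         elements.append(p)
--         if 'test_' in p:
--             break
--
--     for e in reversed(elements):
--         html_name += e + '_'
--
--     return html_name + 'diff.html'
-- ===== SOURCE B (Python) =====
-- def create_html_filename(name):
--     parts = name.split('/')
--     idx = 0
--     for i, p in enumerate(parts):
--         if 'test_' in p:
--             idx = i
--     return '_'.join(parts[idx:]) + '_diff.html'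
-- ===== Notes on version B (the rewrite author's own statement) =====
-- stated objective: simpler
-- what changed: Replaces the reversed-collect-then-reverse-and-accumulate double loop with one forward pass that records the index of the last part containing 'test_' (default 0), then a single slice-and-join.
import Mathlib
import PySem

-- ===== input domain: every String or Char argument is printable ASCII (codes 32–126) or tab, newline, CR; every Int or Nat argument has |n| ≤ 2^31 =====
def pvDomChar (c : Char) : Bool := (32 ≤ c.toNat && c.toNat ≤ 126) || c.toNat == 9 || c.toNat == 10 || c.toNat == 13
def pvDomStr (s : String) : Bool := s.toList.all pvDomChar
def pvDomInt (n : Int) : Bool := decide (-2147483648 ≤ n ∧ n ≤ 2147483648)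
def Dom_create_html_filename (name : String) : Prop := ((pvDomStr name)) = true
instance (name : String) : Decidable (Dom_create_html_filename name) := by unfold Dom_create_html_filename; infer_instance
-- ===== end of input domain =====

-- B replaces A's reversed-collect-then-reverse-and-accumulate double loop with one forward pass recording
-- the index of the last part containing 'test_' (default 0) followed by a slice-and-join: a simpler decomposition, same cost.
-- String concatenation in both ports is carried out on List Char / PySem.Str (exact; Lean's own String.append is opaque to the kernel).

-- ===== PORT A =====
-- 'for p in reversed(parts): elements.append(p); if "test_" in p: break'
def pvCollectA : List String → List String
  | [] => []
  | p :: rest => if PySem.Str.isIn "test_" p then [p] else p :: pvCollectA rest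

def create_html_filename (name : String) : String :=
  let parts := (PySem.Str.split? name "/").getD []   -- sep "/" is non-empty, so split? is always `some`
  let elements := pvCollectA parts.reverse
  -- 'for e in reversed(elements): html_name += e + "_"'
  let html := elements.reverse.foldl (fun s e => s ++ e.toList ++ ['_']) ([] : List Char)
  String.ofList (html ++ "diff.html".toList)

-- ===== PORT B =====
def create_html_filename_alt (name : String) : String :=
  let parts := (PySem.Str.split? name "/").getD []   -- sep "/" is non-empty, so split? is always `some`
  -- 'idx = 0; for i, p in enumerate(parts): if "test_" in p: idx = i'
  let idx := (PySem.List.enumerate parts).foldl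
      (fun acc ip => if PySem.Str.isIn "test_" ip.2 then ip.1 else acc) (0 : Int)
  -- "'_'.join(parts[idx:]) + '_diff.html'"
  String.ofList ((PySem.Str.join "_" (PySem.List.slice parts (some idx))).toList ++ "_diff.html".toList)

-- ===== PRECONDITION & SPEC =====
def Spec_create_html_filename (name : String) (out : String) : Prop := out = create_html_filename_alt name
instance (name : String) (out : String) : Decidable (Spec_create_html_filename name out) := by unfold Spec_create_html_filename; infer_instance

-- ===== CLAIM (what is proved, stated in full; the proofs are below) =====
def Claim_equal_create_html_filename : Prop := ∀ (name : String), Dom_create_html_filename name → Spec_create_html_filename name (create_html_filename name)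

-- ===== LEMMAS AND PROOFS =====

-- splitOn.go always produces at least one piece
lemma pv_go_ne_nil (sep : List Char) : ∀ (fuel : Nat) (l cur : List Char) (acc : List (List Char)),
    PySem.Chars.splitOn.go sep fuel l cur acc ≠ [] := by
  intro fuel
  induction fuel with
  | zero => intro l cur acc; simp [PySem.Chars.splitOn.go]
  | succ n ih =>
    intro l cur acc
    cases l with
    | nil => simp [PySem.Chars.splitOn.go]
    | cons c rest =>
      simp only [PySem.Chars.splitOn.go]
      split_ifs with h
      · exact ih _ _ _
      · exact ih _ _ _

-- name.split('/') is never the empty list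
lemma pv_parts_ne (name : String) : (PySem.Str.split? name "/").getD [] ≠ [] := by
  have h := PySem.Str.split?_map name "/"
  cases hs : PySem.Str.split? name "/" with
  | none =>
    rw [hs] at h
    simp [PySem.Chars.split?] at h
  | some ps =>
    rw [hs] at h
    simp only [Option.map_some] at h
    intro hnil
    simp only [Option.getD_some] at hnil
    subst hnil
    simp [PySem.Chars.split?, PySem.Chars.splitOn] at h
    exact pv_go_ne_nil _ _ _ _ _ h

-- B's last-match index, named for the proofs
def pvIdx (ps : List String) : Int :=
  (PySem.List.enumerate ps).foldl (fun acc ip => if PySem.Str.isIn "test_" ip.2 then ip.1 else acc) 0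

lemma pv_foldl_enum_append (xs : List String) (p : String) (s a : Int) :
    (PySem.List.enumerate (xs ++ [p]) s).foldl (fun acc ip => if PySem.Str.isIn "test_" ip.2 then ip.1 else acc) a
      = if PySem.Str.isIn "test_" p then s + xs.length
        else (PySem.List.enumerate xs s).foldl (fun acc ip => if PySem.Str.isIn "test_" ip.2 then ip.1 else acc) a := by
  rw [PySem.List.enumerate_append, List.foldl_append]
  simp [PySem.List.enumerate_cons, PySem.List.enumerate_nil]

lemma pvIdx_append (xs : List String) (p : String) :
    pvIdx (xs ++ [p]) = if PySem.Str.isIn "test_" p then (xs.length : Int) else pvIdx xs := by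
  unfold pvIdx
  rw [pv_foldl_enum_append]
  simp

lemma pvIdx_nonneg (ps : List String) : 0 ≤ pvIdx ps := by
  induction ps using List.reverseRecOn with
  | nil => simp [pvIdx, PySem.List.enumerate_nil]
  | append_singleton xs p ih =>
    rw [pvIdx_append]
    split_ifs
    · positivity
    · exact ih

lemma pvIdx_lt (ps : List String) (h : ps ≠ []) : pvIdx ps < ps.length := by
  induction ps using List.reverseRecOn with
  | nil => exact absurd rfl h
  | append_singleton xs p ih =>
    rw [pvIdx_append]
    split_ifs
    · simp
    · cases xs with
      | nil => simp [pvIdx, PySem.List.enumerate_nil]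
      | cons y ys =>
        have := ih (by simp)
        simp only [List.length_append, List.length_singleton]
        omega

-- A's collected elements, re-reversed, are exactly the suffix from B's index
lemma pv_suffix_eq (ps : List String) :
    (pvCollectA ps.reverse).reverse = ps.drop (pvIdx ps).toNat := by
  induction ps using List.reverseRecOn with
  | nil => simp [pvCollectA]
  | append_singleton xs p ih =>
    rw [List.reverse_append]
    simp only [List.reverse_singleton, List.singleton_append, pvCollectA, pvIdx_append]
    split_ifs with h
    · have : ((xs.length : Int)).toNat = xs.length := by simp
      rw [this]
      simp
    · have hle : (pvIdx xs).toNat ≤ xs.length := by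
        rcases eq_or_ne xs [] with rfl | hxs
        · simp [pvIdx, PySem.List.enumerate_nil]
        · have := pvIdx_lt xs hxs
          have := pvIdx_nonneg xs
          omega
      rw [List.reverse_cons, ih, List.drop_append_of_le_length hle]

-- the accumulating 'html_name += e + "_"' loop, as a structural function
def pvU : List String → List Char
  | [] => []
  | x :: xs => x.toList ++ '_' :: pvU xs

lemma pv_foldl_eq_U (l : List String) (acc : List Char) :
    l.foldl (fun s e => s ++ e.toList ++ ['_']) acc = acc ++ pvU l := by
  induction l generalizing acc with
  | nil => simp [pvU]
  | cons x xs ih => rw [List.foldl_cons, ih, pvU]; simp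

lemma pvU_join (l : List String) (h : l ≠ []) :
    pvU l = PySem.Chars.join ['_'] (l.map String.toList) ++ ['_'] := by
  induction l with
  | nil => exact absurd rfl h
  | cons x xs ih =>
    cases xs with
    | nil => simp [pvU, PySem.Chars.join_singleton]
    | cons y ys =>
      rw [pvU, ih (by simp)]
      simp only [List.map_cons]
      rw [PySem.Chars.join_cons_cons]
      simp

theorem pv_main (name : String) : create_html_filename name = create_html_filename_alt name := by
  have hne := pv_parts_ne name
  simp only [create_html_filename, create_html_filename_alt]
  set ps := (PySem.Str.split? name "/").getD [] with hps
  have hpv : (PySem.List.enumerate ps).foldl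
      (fun acc ip => if PySem.Str.isIn "test_" ip.2 then ip.1 else acc) (0 : Int) = pvIdx ps := rfl
  rw [hpv, PySem.List.slice_from ps (pvIdx_nonneg ps), pv_foldl_eq_U, pv_suffix_eq]
  have hsuff : ps.drop (pvIdx ps).toNat ≠ [] := by
    rw [ne_eq, List.drop_eq_nil_iff]
    have h1 := pvIdx_lt ps hne
    have h2 := pvIdx_nonneg ps
    omega
  rw [pvU_join _ hsuff, PySem.Str.toList_join]
  have h3 : "_".toList = ['_'] := rfl
  have h4 : "_diff.html".toList = '_' :: "diff.html".toList := rfl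
  rw [h3, h4]
  simp

-- ===== VERDICT (by name: the statement is the Claim_ definition above) =====
theorem create_html_filename_spec : Claim_equal_create_html_filename := by
  intro name _
  exact pv_main name
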